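-- pv_equiv track=rewrite | github.com/KarmanyaT28/GFG-Python-DSA-Solutions | 04_List/10.py | moreFrequent
-- ===== SOURCE A (Python) =====
-- def moreFrequent(arr, x, y):
--     countX = 0
--     countY = 0
--
--     n = len(arr)
--
--     for i in range(0,n):
--         if arr[i]==x:
--             countX+=1
--
--         if arr[i]==y:
--             countY+=1
--
--
--     if countX>countY:
--         return x
--     elif countY>countX:
--         return y
--     else:
--         return min(x,y)
-- ===== SOURCE B (Python) =====
-- def _bisect_left(s, v):
--     lo, hi = 0, len(s)
--     while lo < hi:
--         mid = (lo + hi) // 2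
--         if s[mid] < v:
--             lo = mid + 1
--         else:
--             hi = mid
--     return lo
--
--
-- def _bisect_right(s, v):
--     lo, hi = 0, len(s)
--     while lo < hi:
--         mid = (lo + hi) // 2
--         if s[mid] <= v:
--             lo = mid + 1
--         else:
--             hi = mid
--     return lo
--
--
-- def moreFrequent(arr, x, y):
--     s = sorted(arr)
--     cx = _bisect_right(s, x) - _bisect_left(s, x)
--     cy = _bisect_right(s, y) - _bisect_left(s, y)
--     if cx > cy:
--         return x
--     if cy > cx:
--         return y
--     return min(x, y)
-- ===== Notes on version B (the rewrite author's own statement) =====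
-- stated objective: alternative
-- what changed: Replaces the linear two-counter scan with sort-then-binary-search: sort the array once, then obtain each count as bisect_right minus bisect_left (hand-written binary searches) on the sorted copy, keeping the same comparison and min tie-break.
import Mathlib
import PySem

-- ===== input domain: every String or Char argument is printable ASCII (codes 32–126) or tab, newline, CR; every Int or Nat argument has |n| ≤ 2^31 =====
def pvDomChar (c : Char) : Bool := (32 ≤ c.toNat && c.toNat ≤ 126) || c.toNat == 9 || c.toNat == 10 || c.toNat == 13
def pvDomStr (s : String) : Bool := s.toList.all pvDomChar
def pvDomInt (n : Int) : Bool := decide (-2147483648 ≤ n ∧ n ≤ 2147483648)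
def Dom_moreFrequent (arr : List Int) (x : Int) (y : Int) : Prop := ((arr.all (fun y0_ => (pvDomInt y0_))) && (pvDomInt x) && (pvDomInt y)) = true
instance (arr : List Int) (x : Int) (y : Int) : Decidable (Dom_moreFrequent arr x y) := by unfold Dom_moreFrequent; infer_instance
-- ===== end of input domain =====

-- B sorts the array once and counts x and y via hand-written binary searches (bisect_right - bisect_left)
-- on the sorted copy; same decision rule. Alternative algorithm, not claimed faster.

-- ===== PORT A =====
-- two counters, index loop over range(0, n)
def moreFrequent (arr : List Int) (x : Int) (y : Int) : Int :=
  let n : Int := arr.length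
  let c := (PySem.List.pyRange 0 n 1).foldl
    (fun (c : Int × Int) i =>
      let v := PySem.List.pyGetD arr i 0
      let c := if v == x then (c.1 + 1, c.2) else c
      let c := if v == y then (c.1, c.2 + 1) else c
      c) (0, 0)
  if c.1 > c.2 then x
  else if c.2 > c.1 then y
  else min x y

-- ===== PORT B =====
-- hand-written binary searches over the sorted copy; the while loop becomes recursion with
-- fuel = hi - lo at the call (each iteration shrinks hi - lo, so the fuel only makes it total)
def bisectLeftGo (s : List Int) (v : Int) : Nat → Nat → Nat → Nat
  | 0, lo, _ => lo
  | fuel + 1, lo, hi =>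
      if lo < hi then
        let mid := (lo + hi) / 2
        if s.getD mid 0 < v then bisectLeftGo s v fuel (mid + 1) hi
        else bisectLeftGo s v fuel lo mid
      else lo

def bisectRightGo (s : List Int) (v : Int) : Nat → Nat → Nat → Nat
  | 0, lo, _ => lo
  | fuel + 1, lo, hi =>
      if lo < hi then
        let mid := (lo + hi) / 2
        if s.getD mid 0 ≤ v then bisectRightGo s v fuel (mid + 1) hi
        else bisectRightGo s v fuel lo mid
      else lo

def bisectLeftB (s : List Int) (v : Int) : Nat := bisectLeftGo s v s.length 0 s.length

def bisectRightB (s : List Int) (v : Int) : Nat := bisectRightGo s v s.length 0 s.length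

def moreFrequent_alt (arr : List Int) (x : Int) (y : Int) : Int :=
  let s := PySem.List.sorted arr (fun v => v) false
  let cx : Int := (bisectRightB s x : Int) - (bisectLeftB s x : Int)
  let cy : Int := (bisectRightB s y : Int) - (bisectLeftB s y : Int)
  if cx > cy then x
  else if cy > cx then y
  else min x y

-- ===== PRECONDITION & SPEC =====
def Spec_moreFrequent (arr : List Int) (x : Int) (y : Int) (out : Int) : Prop := out = moreFrequent_alt arr x y
instance (arr : List Int) (x : Int) (y : Int) (out : Int) : Decidable (Spec_moreFrequent arr x y out) := by unfold Spec_moreFrequent; infer_instance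

-- ===== CLAIM =====
def Claim_equal_moreFrequent : Prop := ∀ (arr : List Int) (x : Int) (y : Int), Dom_moreFrequent arr x y → Spec_moreFrequent arr x y (moreFrequent arr x y)

-- ===== LEMMAS AND PROOFS =====

-- A side: the two-counter fold over the elements computes the two counts
lemma count_fold (arr : List Int) (x y : Int) (cx cy : Int) :
    arr.foldl
      (fun (c : Int × Int) v =>
        let c := if v == x then (c.1 + 1, c.2) else c
        let c := if v == y then (c.1, c.2 + 1) else c
        c) (cx, cy)
      = (cx + arr.count x, cy + arr.count y) := by
  induction arr generalizing cx cy with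
  | nil => simp
  | cons a t ih =>
    simp only [List.foldl_cons]
    rcases Bool.eq_false_or_eq_true (a == x) with hx | hx <;>
    rcases Bool.eq_false_or_eq_true (a == y) with hy | hy <;>
      simp only [hx, hy, Bool.false_eq_true, reduceIte] <;>
      rw [ih] <;>
      simp only [List.count_cons, hx, hy, Prod.mk.injEq, Bool.false_eq_true, reduceIte] <;>
      constructor <;> push_cast <;> ring

-- in a sorted list, an element at index mid satisfying a monotone-downward predicate pushes countP past mid
lemma countP_ge_of_sorted (s : List Int) (p : Int → Bool)
    (hmono : ∀ a b : Int, a ≤ b → p b = true → p a = true)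
    (hs : s.Pairwise (· ≤ ·)) (mid : Nat) (hm : mid < s.length)
    (h : p s[mid] = true) : mid + 1 ≤ s.countP p := by
  have htake : (s.take (mid + 1)).countP p = (s.take (mid + 1)).length := by
    apply List.countP_eq_length.mpr
    intro a ha
    obtain ⟨i, hi, hieq⟩ := List.mem_take_iff_getElem.mp ha
    have hile : i ≤ mid := by omega
    have : s[i] ≤ s[mid] := by
      rcases Nat.lt_or_ge i mid with hlt | hge
      · exact (List.pairwise_iff_getElem.mp hs) i mid (by omega) hm hlt
      · have : i = mid := by omega
        simp [this]
    exact hieq ▸ hmono _ _ this h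
  have hsub : (s.take (mid + 1)).countP p ≤ s.countP p :=
    (List.take_sublist _ _).countP_le
  have hlen : (s.take (mid + 1)).length = mid + 1 := by
    simp [List.length_take]; omega
  omega

-- in a sorted list, a failing monotone-downward predicate at index mid caps countP at mid
lemma countP_le_of_sorted (s : List Int) (p : Int → Bool)
    (hmono : ∀ a b : Int, a ≤ b → p b = true → p a = true)
    (hs : s.Pairwise (· ≤ ·)) (mid : Nat) (hm : mid < s.length)
    (h : p s[mid] = false) : s.countP p ≤ mid := by
  have hdrop : (s.drop mid).countP p = 0 := by
    apply List.countP_eq_zero.mpr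
    intro a ha
    obtain ⟨i, hi, hieq⟩ := List.getElem_of_mem ha
    rw [List.getElem_drop] at hieq
    have hilen : mid + i < s.length := by simp at hi; omega
    have hge : s[mid] ≤ s[mid + i]'hilen := by
      rcases Nat.eq_zero_or_pos i with h0 | hpos
      · subst h0; simp
      · exact (List.pairwise_iff_getElem.mp hs) mid (mid + i) hm hilen (by omega)
    intro hpa
    have := hmono _ _ hge (hieq ▸ hpa)
    simp [h] at this
  have hsplit : s.countP p = (s.take mid).countP p + (s.drop mid).countP p := by
    rw [← List.countP_append, List.take_append_drop]
  have : (s.take mid).countP p ≤ mid := by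
    calc (s.take mid).countP p ≤ (s.take mid).length := List.countP_le_length
    _ ≤ mid := by simp [List.length_take]
  omega

-- the binary search converges to k from any bracketing interval with enough fuel
lemma bisectGo_eq (s : List Int) (p : Int → Bool)
    (go : Nat → Nat → Nat → Nat)
    (hgo : ∀ fuel lo hi, go (fuel + 1) lo hi =
      if lo < hi then
        let mid := (lo + hi) / 2
        if p (s.getD mid 0) then go fuel (mid + 1) hi else go fuel lo mid
      else lo)
    (hgo0 : ∀ lo hi, go 0 lo hi = lo)
    (hmono : ∀ a b : Int, a ≤ b → p b = true → p a = true)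
    (hs : s.Pairwise (· ≤ ·)) :
    ∀ fuel lo hi, hi - lo ≤ fuel → hi ≤ s.length →
      lo ≤ s.countP p → s.countP p ≤ hi → go fuel lo hi = s.countP p := by
  intro fuel
  induction fuel with
  | zero => intro lo hi h1 _ h3 h4; rw [hgo0]; omega
  | succ fuel ih =>
    intro lo hi h1 h2 h3 h4
    rw [hgo]
    by_cases hlh : lo < hi
    · simp only [hlh, if_true]
      have hmidlt : (lo + hi) / 2 < hi := by omega
      have hmidge : lo ≤ (lo + hi) / 2 := by omega
      have hmlen : (lo + hi) / 2 < s.length := by omega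
      have hget : s.getD ((lo + hi) / 2) 0 = s[(lo + hi) / 2] := List.getD_eq_getElem s 0 hmlen
      by_cases hp : p (s.getD ((lo + hi) / 2) 0) = true
      · simp only [hp, if_true]
        have := countP_ge_of_sorted s p hmono hs _ hmlen (by rw [← hget]; exact hp)
        exact ih _ _ (by omega) h2 (by omega) h4
      · simp only [hp]
        have := countP_le_of_sorted s p hmono hs _ hmlen
          (by rw [← hget]; exact Bool.of_not_eq_true hp)
        exact ih _ _ (by omega) (by omega) h3 (by omega)
    · simp only [hlh, if_false]; omega

lemma bisectLeftB_eq (s : List Int) (v : Int) (hs : s.Pairwise (· ≤ ·)) :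
    bisectLeftB s v = s.countP (fun a => decide (a < v)) := by
  refine bisectGo_eq s (fun a => decide (a < v)) (bisectLeftGo s v)
    (fun fuel lo hi => by simp [bisectLeftGo]) (fun lo hi => rfl)
    (fun a b hab hb => by simp at hb ⊢; omega) hs s.length 0 s.length (by omega) le_rfl
    (by omega) ?_
  calc s.countP _ ≤ s.length := List.countP_le_length
  _ ≤ s.length := le_rfl

lemma bisectRightB_eq (s : List Int) (v : Int) (hs : s.Pairwise (· ≤ ·)) :
    bisectRightB s v = s.countP (fun a => decide (a ≤ v)) := by
  refine bisectGo_eq s (fun a => decide (a ≤ v)) (bisectRightGo s v)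
    (fun fuel lo hi => by simp [bisectRightGo]) (fun lo hi => rfl)
    (fun a b hab hb => by simp at hb ⊢; omega) hs s.length 0 s.length (by omega) le_rfl
    (by omega) List.countP_le_length

-- countP (≤ v) − countP (< v) is exactly the multiplicity of v
lemma countP_le_sub_lt (s : List Int) (v : Int) :
    s.countP (fun a => decide (a ≤ v)) = s.count v + s.countP (fun a => decide (a < v)) := by
  induction s with
  | nil => simp
  | cons a t ih =>
    simp only [List.countP_cons, List.count_cons, ih]
    by_cases h1 : a = v <;> by_cases h2 : a < v <;>
      simp [h1, h2, le_of_lt, beq_iff_eq] <;> omega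

theorem moreFrequent_spec : Claim_equal_moreFrequent := by
  intro arr x y _
  unfold Spec_moreFrequent moreFrequent moreFrequent_alt
  -- A's fold computes the two counts
  have hmap : (PySem.List.pyRange 0 (arr.length : Int) 1).map
      (fun j => PySem.List.pyGetD arr j 0) = arr :=
    PySem.List.map_pyGetD_pyRange_zero arr 0
  have hfold :
      (PySem.List.pyRange 0 (arr.length : Int) 1).foldl
        (fun (c : Int × Int) i =>
          let v := PySem.List.pyGetD arr i 0
          let c := if v == x then (c.1 + 1, c.2) else c
          let c := if v == y then (c.1, c.2 + 1) else c
          c) (0, 0)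
      = arr.foldl
        (fun (c : Int × Int) v =>
          let c := if v == x then (c.1 + 1, c.2) else c
          let c := if v == y then (c.1, c.2 + 1) else c
          c) (0, 0) := by
    have h := List.foldl_map (f := fun j => PySem.List.pyGetD arr j 0)
      (g := fun (c : Int × Int) v =>
        let c := if v == x then (c.1 + 1, c.2) else c
        let c := if v == y then (c.1, c.2 + 1) else c
        c) (l := PySem.List.pyRange 0 (arr.length : Int) 1) (init := ((0 : Int), (0 : Int)))
    rw [hmap] at h
    exact h.symm
  -- B's bisect differences compute the same counts on the sorted copy
  have hs : (PySem.List.sorted arr (fun v => v) false).Pairwise (· ≤ ·) :=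
    PySem.List.sorted_pairwise arr (fun v => v)
  have hperm : (PySem.List.sorted arr (fun v => v) false).Perm arr :=
    PySem.List.sorted_perm arr (fun v => v) false
  have hcx : (bisectRightB (PySem.List.sorted arr (fun v => v) false) x : Int)
      - (bisectLeftB (PySem.List.sorted arr (fun v => v) false) x : Int) = (arr.count x : Int) := by
    rw [bisectLeftB_eq _ _ hs, bisectRightB_eq _ _ hs, countP_le_sub_lt, hperm.count_eq]
    push_cast; ring
  have hcy : (bisectRightB (PySem.List.sorted arr (fun v => v) false) y : Int)
      - (bisectLeftB (PySem.List.sorted arr (fun v => v) false) y : Int) = (arr.count y : Int) := by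
    rw [bisectLeftB_eq _ _ hs, bisectRightB_eq _ _ hs, countP_le_sub_lt, hperm.count_eq]
    push_cast; ring
  simp only [hfold, count_fold, hcx, hcy]
  norm_num
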